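-- pv_equiv track=rewrite | github.com/Blossomyyh/leetcode | Robinhood.py | matchVowels
-- ===== SOURCE A (Python) =====
-- def character(ch):
--     vowels = set(['a', 'e', 'i', 'o','u'])
--     if ch in vowels:
--         return "1"
--     else:
--         return "0"
--
-- def matchVowels(pattern, s):
--     if len(s)<len(pattern): return 0
--     res = 0
--     for i in range(len(s)-len(pattern)+1):
--         substring = ""
--         for j in range(len(pattern)):
--             substring +=character(s[i+j])
--         if substring == pattern:
--             res += 1
--     return res
-- ===== SOURCE B (Python) =====
-- def matchVowels(pattern, s):
--     m = len(pattern)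
--     if len(s) < m:
--         return 0
--     mask = "".join("1" if c in "aeiou" else "0" for c in s)
--     return sum(1 for i in range(len(s) - m + 1) if mask[i:i+m] == pattern)
-- ===== Notes on version B (the rewrite author's own statement) =====
-- stated objective: faster
-- what changed: B precomputes the 0/1 vowel mask of s once with a single join pass and counts windows by direct slice comparison, instead of rebuilding a mask string character by character (with a per-character function call and string concatenation) for every window.
import Mathlib
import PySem

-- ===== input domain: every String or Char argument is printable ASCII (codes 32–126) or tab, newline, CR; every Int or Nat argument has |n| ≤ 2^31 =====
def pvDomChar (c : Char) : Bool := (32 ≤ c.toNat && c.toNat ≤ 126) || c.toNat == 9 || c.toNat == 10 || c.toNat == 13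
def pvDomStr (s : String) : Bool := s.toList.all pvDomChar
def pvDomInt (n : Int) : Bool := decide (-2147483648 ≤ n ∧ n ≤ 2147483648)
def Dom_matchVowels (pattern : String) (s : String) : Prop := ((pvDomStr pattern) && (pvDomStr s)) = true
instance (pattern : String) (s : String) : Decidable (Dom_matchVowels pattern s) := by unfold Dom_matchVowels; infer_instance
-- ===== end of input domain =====

-- B precomputes the 0/1 vowel mask of s once and counts windows by slice comparison,
-- instead of rebuilding the mask string character by character for every window (same result; measurably faster in Python).

-- ===== PORT A =====
def character (ch : Char) : String :=
  if ch ∈ (['a', 'e', 'i', 'o', 'u'] : List Char) then "1" else "0"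

def matchVowels (pattern : String) (s : String) : Int :=
  if s.toList.length < pattern.toList.length then 0
  else
    (List.range (s.toList.length - pattern.toList.length + 1)).foldl
      (fun res i =>
        let substring :=
          (List.range pattern.toList.length).foldl
            (fun sub j => sub ++ character (s.toList.getD (i + j) ' ')) ""
        if substring = pattern then res + 1 else res)
      0

-- ===== PORT B =====
def maskChar (c : Char) : Char :=
  if c ∈ (['a', 'e', 'i', 'o', 'u'] : List Char) then '1' else '0'

def matchVowels_alt (pattern : String) (s : String) : Int :=
  let m := pattern.toList.length
  if s.toList.length < m then 0
  else
    let mask := s.toList.map maskChar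
    ((List.range (s.toList.length - m + 1)).filter
      (fun i => (mask.drop i).take m == pattern.toList)).length

-- ===== PRECONDITION & SPEC =====
def Spec_matchVowels (pattern : String) (s : String) (out : Int) : Prop := out = matchVowels_alt pattern s
instance (pattern : String) (s : String) (out : Int) : Decidable (Spec_matchVowels pattern s out) := by unfold Spec_matchVowels; infer_instance

-- ===== CLAIM (what is proved, stated in full; the proofs are below) =====
def Claim_equal_matchVowels : Prop := ∀ (pattern : String) (s : String), Dom_matchVowels pattern s → Spec_matchVowels pattern s (matchVowels pattern s)

-- ===== LEMMAS AND PROOFS =====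

theorem character_toList (c : Char) : (character c).toList = [maskChar c] := by
  unfold character maskChar
  split <;> rfl

-- A's inner loop, started from "", builds exactly the k-prefix of the mask slice at i.
theorem inner_eq (t : List Char) (i k : ℕ) (hk : i + k ≤ t.length) :
    ((List.range k).foldl (fun sub j => sub ++ character (t.getD (i + j) ' ')) "").toList
      = ((t.map maskChar).drop i).take k := by
  induction k with
  | zero => rfl
  | succ k ih =>
      have hk' : i + k ≤ t.length := by omega
      have hlt : i + k < t.length := by omega
      rw [List.range_succ, List.foldl_append]
      simp only [List.foldl_cons, List.foldl_nil]
      rw [String.toList_append, ih hk', character_toList, List.take_add_one]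
      congr 1
      have h1 : ((t.map maskChar).drop i)[k]? = (t.map maskChar)[i + k]? := by
        rw [List.getElem?_drop]
      have h2 : (t.map maskChar)[i + k]? = some (maskChar (t.getD (i + k) ' ')) := by
        rw [List.getElem?_map, List.getElem?_eq_getElem (by simpa using hlt),
          List.getD_eq_getElem t ' ' hlt]
        rfl
      rw [h1, h2]
      rfl

theorem count_foldl (P : ℕ → Prop) [DecidablePred P] (l : List ℕ) (r : Int) :
    l.foldl (fun res i => if P i then res + 1 else res) r
      = r + ((l.filter (fun i => decide (P i))).length : Int) := by
  induction l generalizing r with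
  | nil => simp
  | cons x xs ih =>
      simp only [List.foldl_cons, List.filter_cons]
      by_cases h : P x
      · simp [h, ih]; omega
      · simp [h, ih]

theorem matchVowels_eq (pattern s : String) :
    matchVowels pattern s = matchVowels_alt pattern s := by
  unfold matchVowels matchVowels_alt
  set p := pattern.toList with hp
  set t := s.toList with ht
  by_cases hlen : t.length < p.length
  · simp [hlen]
  · simp only [hlen, reduceIte]
    rw [count_foldl]
    simp only [zero_add]
    refine congrArg _ (congrArg List.length (List.filter_congr ?_))
    intro i hi
    have hi' : i < t.length - p.length + 1 := List.mem_range.mp hi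
    have him : i + p.length ≤ t.length := by omega
    have hsub := inner_eq t i p.length him
    rw [Bool.eq_iff_iff]
    simp only [decide_eq_true_iff, beq_iff_eq]
    constructor
    · intro h
      rw [← hsub, h]
    · intro h
      have : ((List.range p.length).foldl
          (fun sub j => sub ++ character (t.getD (i + j) ' ')) "").toList = pattern.toList := by
        rw [hsub, h]
      exact String.toList_injective this

-- ===== VERDICT (by name: the statement is the Claim_ definition above) =====
theorem matchVowels_spec : Claim_equal_matchVowels := by
  intro pattern s _
  exact matchVowels_eq pattern s
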